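-- pv_equiv track=rewrite | github.com/MAVERICK4596/RestRoomBooking | Python code/core_function.py | Find_the_next
-- ===== SOURCE A (Python) =====
-- def Find_the_next(source_list):
--     occupied_list = []
--     difference_list = []
--     max_difference = 0
--
--     for i in range(0, len(source_list)):
--         if(source_list[i] == 1):
--             occupied_list.append(i)
--
--     if(len(occupied_list)==0):
--        source_list[0]=1
--        return 0
--     elif(len(occupied_list)==1):
--         source_list[len(source_list)-1]=1
--         return len(source_list)-1
--     else:
--         for j in range(0, len(occupied_list)-1):
--             difference = abs(occupied_list[j]-occupied_list[j+1])
--             difference_list.append(difference)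
--
--         max_difference = max(difference_list)
--         for k in range(0, len(occupied_list)-1):
--             difference = abs(occupied_list[k]-occupied_list[k+1])
--             if(difference == max_difference):
--                 source_list[(occupied_list[k]+(difference//2))]=1
--                 return (occupied_list[k]+(difference//2))
-- ===== SOURCE B (Python) =====
-- def Find_the_next(source_list):
--     # One streaming pass: count ones, remember previous one's index, track
--     # midpoint of the first largest gap. Mutates source_list like A does.
--     ones = 0
--     prev = None
--     best_gap = 0
--     best_mid = 0
--     for i, v in enumerate(source_list):
--         if v == 1:
--             if prev is not None:
--                 gap = i - prev
--                 if gap > best_gap: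
--                     best_gap = gap
--                     best_mid = prev + gap // 2
--             prev = i
--             ones += 1
--     if ones == 0:
--         source_list[0] = 1
--         return 0
--     if ones == 1:
--         source_list[-1] = 1
--         return len(source_list) - 1
--     source_list[best_mid] = 1
--     return best_mid
-- ===== Notes on version B (the rewrite author's own statement) =====
-- stated objective: simpler
-- what changed: B replaces A's three passes (collect occupied indices, build a difference list and take its max, rescan for the first max gap) by a single streaming pass that tracks the previous occupied index and the midpoint of the first strictly-largest gap.
-- outside the precondition, e.g. on Find_the_next([]): A raises IndexError, B raises IndexError
import Mathlib
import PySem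

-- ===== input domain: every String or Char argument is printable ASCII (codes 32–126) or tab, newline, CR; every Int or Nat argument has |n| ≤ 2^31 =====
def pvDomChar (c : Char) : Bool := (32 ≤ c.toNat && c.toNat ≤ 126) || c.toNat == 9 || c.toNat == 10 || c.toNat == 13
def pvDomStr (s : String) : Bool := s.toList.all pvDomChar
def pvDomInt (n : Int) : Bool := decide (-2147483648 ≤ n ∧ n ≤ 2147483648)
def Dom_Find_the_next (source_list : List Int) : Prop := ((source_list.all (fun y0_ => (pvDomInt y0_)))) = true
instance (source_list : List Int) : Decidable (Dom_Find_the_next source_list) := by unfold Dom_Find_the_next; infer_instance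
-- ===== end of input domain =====

-- B replaces A's index-collection plus two gap passes by one streaming pass over the list
-- (objective: simpler / single pass).  Both programs mutate source_list identically in Python;
-- the equivalence proved here is about the RETURN value.

-- ===== PORT A =====
-- A's third for-loop with its early return; the [] case corresponds to Python falling off
-- the loop (unreachable, since max(difference_list) occurs in the list).
def pvA_loop3 (occupied : List Int) (maxd : Int) : List Int → Int
  | [] => 0
  | k :: ks =>
    let d := |PySem.List.pyGetD occupied k 0 - PySem.List.pyGetD occupied (k + 1) 0|
    if d = maxd then PySem.List.pyGetD occupied k 0 + PySem.Int.floordiv d 2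
    else pvA_loop3 occupied maxd ks

def Find_the_next (source_list : List Int) : Int :=
  let occupied : List Int :=
    (PySem.List.pyRange 0 (source_list.length : Int) 1).foldl
      (fun acc i => if PySem.List.pyGetD source_list i 0 = 1 then acc ++ [i] else acc) []
  if occupied.length = 0 then 0
  else if occupied.length = 1 then (source_list.length : Int) - 1
  else
    let difference_list : List Int :=
      (PySem.List.pyRange 0 ((occupied.length : Int) - 1) 1).foldl
        (fun acc j => acc ++ [|PySem.List.pyGetD occupied j 0 - PySem.List.pyGetD occupied (j + 1) 0|]) []
    let max_difference := (PySem.List.max? difference_list (fun x => x)).getD 0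
    pvA_loop3 occupied max_difference (PySem.List.pyRange 0 ((occupied.length : Int) - 1) 1)

-- ===== PORT B =====
-- one step of B's loop body, on state (ones, prev, best_gap, best_mid)
def pvB_step (st : Int × Option Int × Int × Int) (p : Int × Int) : Int × Option Int × Int × Int :=
  if p.2 = 1 then
    match st with
    | (ones, some prev, bg, bm) =>
      let gap := p.1 - prev
      if bg < gap then (ones + 1, some p.1, gap, prev + PySem.Int.floordiv gap 2)
      else (ones + 1, some p.1, bg, bm)
    | (ones, none, bg, bm) => (ones + 1, some p.1, bg, bm)
  else st

def Find_the_next_alt (source_list : List Int) : Int :=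
  let st := (PySem.List.enumerate source_list 0).foldl pvB_step (0, none, 0, 0)
  if st.1 = 0 then 0
  else if st.1 = 1 then (source_list.length : Int) - 1
  else st.2.2.2

-- ===== PRECONDITION & SPEC =====
-- Pre_ excludes only the empty list, on which Python A raises IndexError (source_list[0]=1).
def Pre_Find_the_next (source_list : List Int) : Prop := source_list ≠ []
instance (source_list : List Int) : Decidable (Pre_Find_the_next source_list) := by unfold Pre_Find_the_next; infer_instance
def pvWitness_Find_the_next : List Int := [0, 1, 0, 0, 1, 0]

def Spec_Find_the_next (source_list : List Int) (out : Int) : Prop := out = Find_the_next_alt source_list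
instance (source_list : List Int) (out : Int) : Decidable (Spec_Find_the_next source_list out) := by unfold Spec_Find_the_next; infer_instance

-- ===== CLAIM (what is proved, stated in full; the proofs are below) =====
def Claim_equal_Find_the_next : Prop := ∀ (source_list : List Int), Dom_Find_the_next source_list → Pre_Find_the_next source_list → Spec_Find_the_next source_list (Find_the_next source_list)

-- ===== LEMMAS AND PROOFS =====

-- the list of occupied indices, as both ports compute it
def pvOcc (xs : List Int) : List Int :=
  (PySem.List.pyRange 0 (xs.length : Int) 1).filter (fun i => decide (PySem.List.pyGetD xs i 0 = 1))

-- gaps between consecutive elements, starting from prev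
def pvGapsFrom (prev : Int) : List Int → List Int
  | [] => []
  | i :: t => (i - prev) :: pvGapsFrom i t

-- midpoint at the first gap equal to m
def pvPick (prev m : Int) : List Int → Int
  | [] => 0
  | i :: t => if i - prev = m then prev + PySem.Int.floordiv m 2 else pvPick i m t

-- B's loop after the first occupied index, on state (prev, best_gap, best_mid)
def pvFoldB : (Int × Int × Int) → List Int → (Int × Int × Int)
  | st, [] => st
  | (prev, bg, bm), i :: t =>
      if bg < i - prev then pvFoldB (i, i - prev, prev + PySem.Int.floordiv (i - prev) 2) t
      else pvFoldB (i, bg, bm) t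

theorem pv_foldl_max_le_init : ∀ (L : List Int) (b : Int), b ≤ L.foldl max b := by
  intro L
  induction L with
  | nil => intro b; simp
  | cons g t ih => intro b; exact le_trans (le_max_left b g) (ih (max b g))

theorem pv_foldl_filter {α β : Type} (p : α → Bool) (g : β → α → β) :
    ∀ (l : List α) (init : β),
      l.foldl (fun st x => if p x then g st x else st) init = (l.filter p).foldl g init := by
  intro l
  induction l with
  | nil => intro init; simp
  | cons x t ih =>
    intro init
    by_cases hx : p x
    · simp [hx, ih]
    · simp [hx, ih]

theorem pv_foldB_keep : ∀ (l : List Int) (prev bg bm : Int),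
    (pvGapsFrom prev l).foldl max bg = bg → (pvFoldB (prev, bg, bm) l).2.2 = bm := by
  intro l
  induction l with
  | nil => intro prev bg bm _; simp [pvFoldB]
  | cons i t ih =>
    intro prev bg bm h
    simp only [pvGapsFrom, List.foldl_cons] at h
    have hle : max bg (i - prev) ≤ bg := by
      have h2 := pv_foldl_max_le_init (pvGapsFrom i t) (max bg (i - prev))
      rw [h] at h2; exact h2
    have hg : ¬ bg < i - prev := by
      have := le_max_right bg (i - prev); omega
    have hbg : max bg (i - prev) = bg := by
      have := le_max_left bg (i - prev); omega
    simp only [pvFoldB, hg, if_false]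
    exact ih i bg bm (by rw [hbg] at h; exact h)

theorem pv_foldB_main : ∀ (l : List Int) (prev bg bm : Int),
    bg < (pvGapsFrom prev l).foldl max bg →
    (pvFoldB (prev, bg, bm) l).2.2 = pvPick prev ((pvGapsFrom prev l).foldl max bg) l := by
  intro l
  induction l with
  | nil => intro prev bg bm h; simp [pvGapsFrom] at h
  | cons i t ih =>
    intro prev bg bm h
    simp only [pvGapsFrom, List.foldl_cons] at h ⊢
    by_cases hcase : bg < i - prev
    · have hmax : max bg (i - prev) = i - prev := max_eq_right (le_of_lt hcase)
      rw [hmax] at h ⊢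
      by_cases heq : (pvGapsFrom i t).foldl max (i - prev) = i - prev
      · rw [heq] at h ⊢
        simp only [pvFoldB, hcase, if_true, pvPick]
        exact pv_foldB_keep t i (i - prev) _ heq
      · have hg : i - prev < (pvGapsFrom i t).foldl max (i - prev) :=
          lt_of_le_of_ne (pv_foldl_max_le_init _ _) (Ne.symm heq)
        simp only [pvFoldB, hcase, if_true, pvPick, if_neg (ne_of_lt hg)]
        exact ih i (i - prev) _ hg
    · have hmax : max bg (i - prev) = bg := max_eq_left (le_of_not_gt hcase)
      rw [hmax] at h ⊢
      have hne : i - prev ≠ (pvGapsFrom i t).foldl max bg := by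
        have := le_of_not_gt hcase; omega
      simp only [pvFoldB, hcase, if_false, pvPick, if_neg hne]
      exact ih i bg bm h

-- B's total fold in terms of pvFoldB
theorem pv_stepFold : ∀ (l : List Int) (n pr bg bm : Int),
    l.foldl (fun st i => pvB_step st (i, 1)) (n, some pr, bg, bm)
      = (n + l.length, some (pvFoldB (pr, bg, bm) l).1, (pvFoldB (pr, bg, bm) l).2.1, (pvFoldB (pr, bg, bm) l).2.2) := by
  intro l
  induction l with
  | nil => intro n pr bg bm; simp [pvFoldB]
  | cons i t ih =>
    intro n pr bg bm
    rw [List.foldl_cons]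
    by_cases hcase : bg < i - pr
    · have hstep : pvB_step (n, some pr, bg, bm) (i, 1)
          = (n + 1, some i, i - pr, pr + PySem.Int.floordiv (i - pr) 2) := by
        simp [pvB_step, hcase]
      rw [hstep, ih]
      simp only [pvFoldB, hcase, if_true, List.length_cons]
      refine Prod.ext ?_ rfl
      push_cast; ring
    · have hstep : pvB_step (n, some pr, bg, bm) (i, 1) = (n + 1, some i, bg, bm) := by
        simp [pvB_step, hcase]
      rw [hstep, ih]
      simp only [pvFoldB, hcase, if_false, List.length_cons]
      refine Prod.ext ?_ rfl
      push_cast; ring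

theorem pv_B_char (xs : List Int) :
    (PySem.List.enumerate xs 0).foldl pvB_step (0, none, 0, 0)
      = (pvOcc xs).foldl (fun st i => pvB_step st (i, 1)) (0, none, 0, 0) := by
  rw [PySem.List.enumerate_eq_map_pyRange (d := 0), List.foldl_map]
  have hpt : (fun (st : Int × Option Int × Int × Int) (j : Int) => pvB_step st (j, PySem.List.pyGetD xs j 0))
      = fun st j => if decide (PySem.List.pyGetD xs j 0 = 1) then pvB_step st (j, 1) else st := by
    funext st j
    by_cases hv : PySem.List.pyGetD xs j 0 = 1
    · simp [hv]
    · simp [hv, pvB_step]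
  rw [hpt, pv_foldl_filter]
  rfl

-- A's occupied list is pvOcc
theorem pv_A_occ (xs : List Int) :
    (PySem.List.pyRange 0 (xs.length : Int) 1).foldl
      (fun acc i => if PySem.List.pyGetD xs i 0 = 1 then acc ++ [i] else acc) [] = pvOcc xs := by
  rw [PySem.List.foldl_append_ite_eq_filter]
  rfl

theorem pv_occ_sorted (xs : List Int) : (pvOcc xs).Pairwise (· < ·) := by
  exact List.Pairwise.filter _ (PySem.List.pairwise_lt_pyRange_one 0 (xs.length : Int))

-- A's difference list
theorem pv_range_gapsAbs : ∀ (l : List Int) (a : Int), (a :: l).Pairwise (· < ·) →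
    (List.range l.length).map (fun k => |(a :: l).getD k 0 - (a :: l).getD (k + 1) 0|)
      = pvGapsFrom a l := by
  intro l
  induction l with
  | nil => intro a _; simp [pvGapsFrom]
  | cons b t ih =>
    intro a hp
    have hab : a < b := (List.pairwise_cons.mp hp).1 b (by simp)
    rw [List.length_cons, List.range_succ_eq_map, List.map_cons, List.map_map]
    simp only [pvGapsFrom]
    refine congrArg₂ (· :: ·) ?_ ?_
    · show |(a :: b :: t).getD 0 0 - (a :: b :: t).getD 1 0| = b - a
      simp only [List.getD_cons_zero, List.getD_cons_succ]
      rw [abs_sub_comm]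
      exact abs_of_nonneg (by omega)
    · rw [← ih b (List.pairwise_cons.mp hp).2]
      apply List.map_congr_left
      intro k _
      simp [Nat.succ_eq_add_one]

theorem pv_A_diffs (occ : List Int) (h : occ.Pairwise (· < ·)) :
    ∀ a l, occ = a :: l →
    (PySem.List.pyRange 0 ((occ.length : Int) - 1) 1).foldl
      (fun acc j => acc ++ [|PySem.List.pyGetD occ j 0 - PySem.List.pyGetD occ (j + 1) 0|]) []
      = pvGapsFrom a l := by
  intro a l hocc
  subst hocc
  rw [PySem.List.foldl_append_singleton_eq_map]
  have hlen : ((a :: l).length : Int) - 1 = (l.length : Int) := by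
    simp
  rw [hlen, PySem.List.pyRange_zero_nat, List.map_map]
  rw [← pv_range_gapsAbs l a h]
  apply List.map_congr_left
  intro k _
  have hcast : ((k : Int) + 1) = ((k + 1 : Nat) : Int) := by push_cast; ring
  simp only [Function.comp_apply, hcast, PySem.List.pyGetD_natCast]

theorem pv_loop3_aux (occ : List Int) (h : occ.Pairwise (· < ·)) (m : Int) :
    ∀ (n k : Nat), k < occ.length → n = occ.length - 1 - k →
    pvA_loop3 occ m (PySem.List.pyRange (k : Int) ((occ.length : Int) - 1) 1)
      = pvPick (occ.getD k 0) m (occ.drop (k + 1)) := by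
  intro n
  induction n with
  | zero =>
    intro k hk hn
    rw [PySem.List.pyRange_one_eq_nil (by omega)]
    rw [List.drop_eq_nil_of_le (by omega)]
    simp [pvA_loop3, pvPick]
  | succ n ih =>
    intro k hk hn
    have hklt : k + 1 < occ.length := by omega
    rw [PySem.List.pyRange_one_cons (by omega)]
    have hcast : ((k : Int) + 1) = ((k + 1 : Nat) : Int) := by push_cast; ring
    simp only [pvA_loop3, hcast, PySem.List.pyGetD_natCast]
    have hgk : occ[k]? = some occ[k] := List.getElem?_eq_getElem (by omega)
    have hgk1 : occ[k + 1]? = some occ[k + 1] := List.getElem?_eq_getElem hklt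
    have hlt : occ[k] < occ[k + 1] :=
      List.pairwise_iff_getElem.mp h k (k + 1) (by omega) hklt (by omega)
    simp only [List.getD, hgk, hgk1, Option.getD_some]
    have habs : |occ[k] - occ[k + 1]| = occ[k + 1] - occ[k] := by
      rw [abs_sub_comm]; exact abs_of_nonneg (by omega)
    rw [habs, List.drop_eq_getElem_cons hklt]
    simp only [pvPick]
    by_cases hd : occ[k + 1] - occ[k] = m
    · rw [if_pos hd, if_pos hd, hd]
    · rw [if_neg hd, if_neg hd]
      have hrec := ih (k + 1) hklt (by omega)
      rw [hrec]
      simp only [List.getD, hgk1, Option.getD_some]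

theorem pv_A_loop3_char (occ : List Int) (h : occ.Pairwise (· < ·)) (m : Int) :
    ∀ a l, occ = a :: l →
    pvA_loop3 occ m (PySem.List.pyRange 0 ((occ.length : Int) - 1) 1) = pvPick a m l := by
  intro a l hocc
  have h0 : ((0 : Nat) : Int) = (0 : Int) := by norm_num
  have := pv_loop3_aux occ h m (occ.length - 1) 0 (by rw [hocc]; simp) (by omega)
  rw [h0] at this
  rw [this, hocc]
  simp

-- ===== VERDICT (by name: the statement is the Claim_ definition above) =====
theorem Find_the_next_spec : Claim_equal_Find_the_next := by
  unfold Claim_equal_Find_the_next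
  intro xs _ _
  unfold Spec_Find_the_next
  have hA := pv_A_occ xs
  have hB := pv_B_char xs
  simp only [Find_the_next, Find_the_next_alt, hA, hB]
  rcases hocc : pvOcc xs with _ | ⟨a, _ | ⟨i, t⟩⟩
  · simp
  · simp [pvB_step]
  · have hsort := pv_occ_sorted xs
    rw [hocc] at hsort
    have hai : a < i := (List.pairwise_cons.mp hsort).1 i (by simp)
    -- B side
    have hstep1 : pvB_step (0, none, 0, 0) (a, 1) = (1, some a, 0, 0) := by
      simp [pvB_step]
    have hBfold := pv_stepFold (i :: t) 1 a 0 0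
    -- the max of the gaps
    have hgf : pvGapsFrom a (i :: t) = (i - a) :: pvGapsFrom i t := by
      simp [pvGapsFrom]
    have hM : (pvGapsFrom a (i :: t)).foldl max 0
        = (pvGapsFrom i t).foldl max (i - a) := by
      rw [hgf, List.foldl_cons, max_eq_right (by omega : (0:ℤ) ≤ i - a)]
    have hMge : i - a ≤ (pvGapsFrom i t).foldl max (i - a) := pv_foldl_max_le_init _ _
    have hMpos : 0 < (pvGapsFrom a (i :: t)).foldl max 0 := by rw [hM]; omega
    have hbm := pv_foldB_main (i :: t) a 0 0 hMpos
    -- A side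
    have hdiffs := pv_A_diffs (a :: i :: t) hsort a (i :: t) rfl
    have hloop := pv_A_loop3_char (a :: i :: t) hsort
        (((PySem.List.max? (pvGapsFrom a (i :: t)) (fun x => x)).getD 0)) a (i :: t) rfl
    have hmax : (PySem.List.max? (pvGapsFrom a (i :: t)) (fun x => x)).getD 0
        = (pvGapsFrom a (i :: t)).foldl max 0 := by
      rw [hgf, PySem.List.max?_id_cons, Option.getD_some, ← hM, hgf]
    -- discharge the length branches
    have hlenA0 : ((a :: i :: t).length ≠ 0) := by simp
    have hlenA1 : ((a :: i :: t).length ≠ 1) := by simp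
    rw [List.foldl_cons, hstep1, hBfold]
    have hones0 : (1 : ℤ) + ((i :: t).length : ℤ) ≠ 0 := by
      have : (0:ℤ) ≤ ((i :: t).length : ℤ) := by positivity
      omega
    have hones1 : (1 : ℤ) + ((i :: t).length : ℤ) ≠ 1 := by
      simp only [List.length_cons]
      push_cast
      omega
    rw [if_neg hlenA0, if_neg hlenA1]
    simp only [hones0, if_false, hones1]
    rw [hdiffs, hloop, hbm, hmax]
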